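-- pv_equiv track=rewrite | github.com/flaviacaetanoliveira-ui/FDL_Consultoria | processing/faturamento/io_notas_entrada.py | _detect_col_cpf_cnpj
-- ===== SOURCE A (Python) =====
-- def _detect_col_cpf_cnpj(columns: list[str]) -> str:
--     """Coluna de documento do destinatário no export Bling (ex.: «CNPJ/CPF»)."""
--     for c in columns:
--         if str(c).strip() == "CNPJ/CPF":
--             return c
--     for c in columns:
--         cl = str(c).strip().lower().replace(" ", "")
--         if cl in {"cpf/cnpj", "cnpj/cpf"}:
--             return c
--         if "cnpj" in cl and "cpf" in cl:
--             return c
--     for c in columns: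
--         cl = str(c).strip().lower()
--         if ("cnpj" in cl or "cpf" in cl) and "emitente" not in cl:
--             return c
--     return ""
-- ===== SOURCE B (Python) =====
-- def _detect_col_cpf_cnpj(columns: list[str]) -> str:
--     """Single pass: rank each column by match tier (1=exact, 2=combined, 3=loose),
--     keep the earliest column with the best tier."""
--     def _tier(c):
--         s = str(c).strip()
--         if s == "CNPJ/CPF":
--             return 1
--         cl = s.lower().replace(" ", "")
--         if cl in ("cpf/cnpj", "cnpj/cpf") or ("cnpj" in cl and "cpf" in cl):
--             return 2
--         low = s.lower()
--         if ("cnpj" in low or "cpf" in low) and "emitente" not in low: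
--             return 3
--         return 4
--
--     best, best_tier = "", 4
--     for c in columns:
--         t = _tier(c)
--         if t < best_tier:
--             best, best_tier = c, t
--             if t == 1:
--                 break
--     return best
-- ===== Notes on version B (the rewrite author's own statement) =====
-- stated objective: alternative
-- what changed: Replaced the three sequential full scans with one pass that ranks every column by match tier (1 exact, 2 combined, 3 loose) and keeps the earliest column attaining the best tier, breaking early on an exact match.
import Mathlib
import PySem

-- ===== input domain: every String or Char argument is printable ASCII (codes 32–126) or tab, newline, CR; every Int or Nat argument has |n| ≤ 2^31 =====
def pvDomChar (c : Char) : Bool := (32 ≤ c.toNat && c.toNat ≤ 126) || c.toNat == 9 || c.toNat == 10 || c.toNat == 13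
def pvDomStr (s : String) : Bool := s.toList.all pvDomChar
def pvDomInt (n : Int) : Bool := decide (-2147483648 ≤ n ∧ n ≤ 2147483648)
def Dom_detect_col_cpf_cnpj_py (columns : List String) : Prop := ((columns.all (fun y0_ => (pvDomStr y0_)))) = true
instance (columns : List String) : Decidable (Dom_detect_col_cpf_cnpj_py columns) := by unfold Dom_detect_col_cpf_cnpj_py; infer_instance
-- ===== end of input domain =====

-- B replaces A's three sequential scans by ONE pass ranking each column by match tier
-- and keeping the earliest column at the best tier (objective: alternative decomposition).

-- shared predicates: the exact byte-for-byte conditions of A's three loops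
def pvCond1 (c : String) : Bool := PySem.Str.strip c == "CNPJ/CPF"
def pvCond2 (c : String) : Bool :=
  let cl := PySem.Str.replace (PySem.Str.lower (PySem.Str.strip c)) " " ""
  (cl == "cpf/cnpj" || cl == "cnpj/cpf") || (PySem.Str.isIn "cnpj" cl && PySem.Str.isIn "cpf" cl)
def pvCond3 (c : String) : Bool :=
  let cl := PySem.Str.lower (PySem.Str.strip c)
  (PySem.Str.isIn "cnpj" cl || PySem.Str.isIn "cpf" cl) && !(PySem.Str.isIn "emitente" cl)

-- ===== PORT A =====
def pvALoop1 : List String → Option String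
  | [] => none
  | c :: rest => if pvCond1 c then some c else pvALoop1 rest

def pvALoop2 : List String → Option String
  | [] => none
  | c :: rest => if pvCond2 c then some c else pvALoop2 rest

def pvALoop3 : List String → Option String
  | [] => none
  | c :: rest => if pvCond3 c then some c else pvALoop3 rest

def detect_col_cpf_cnpj_py (columns : List String) : String :=
  match pvALoop1 columns with
  | some c => c
  | none =>
    match pvALoop2 columns with
    | some c => c
    | none =>
      match pvALoop3 columns with
      | some c => c
      | none => ""

-- ===== PORT B =====
def pvTier (c : String) : Nat :=
  if pvCond1 c then 1
  else if pvCond2 c then 2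
  else if pvCond3 c then 3
  else 4

def pvBest : List String → String → Nat → String
  | [], best, _ => best
  | c :: rest, best, bt =>
    let t := pvTier c
    if t < bt then (if t = 1 then c else pvBest rest c t)
    else pvBest rest best bt

def detect_col_cpf_cnpj_py_alt (columns : List String) : String :=
  pvBest columns "" 4

-- ===== PRECONDITION & SPEC =====
def Spec_detect_col_cpf_cnpj_py (columns : List String) (out : String) : Prop := out = detect_col_cpf_cnpj_py_alt columns
instance (columns : List String) (out : String) : Decidable (Spec_detect_col_cpf_cnpj_py columns out) := by unfold Spec_detect_col_cpf_cnpj_py; infer_instance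

-- ===== CLAIM (what is proved, stated in full; the proofs are below) =====
def Claim_equal_detect_col_cpf_cnpj_py : Prop := ∀ (columns : List String), Dom_detect_col_cpf_cnpj_py columns → Spec_detect_col_cpf_cnpj_py columns (detect_col_cpf_cnpj_py columns)

-- ===== LEMMAS AND PROOFS =====

lemma pvBest_two (cols : List String) : ∀ best,
    pvBest cols best 2 = (pvALoop1 cols).getD best := by
  induction cols with
  | nil => intro best; rfl
  | cons c rest ih =>
    intro best
    by_cases h1 : pvCond1 c = true
    · simp [pvBest, pvALoop1, pvTier, h1]
    · simp only [Bool.not_eq_true] at h1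
      by_cases h2 : pvCond2 c = true
      · simp [pvBest, pvALoop1, pvTier, h1, h2, ih]
      · simp only [Bool.not_eq_true] at h2
        by_cases h3 : pvCond3 c = true
        · simp [pvBest, pvALoop1, pvTier, h1, h2, h3, ih]
        · simp only [Bool.not_eq_true] at h3
          simp [pvBest, pvALoop1, pvTier, h1, h2, h3, ih]

lemma pvBest_three (cols : List String) : ∀ best,
    pvBest cols best 3 = (pvALoop1 cols).getD ((pvALoop2 cols).getD best) := by
  induction cols with
  | nil => intro best; rfl
  | cons c rest ih =>
    intro best
    by_cases h1 : pvCond1 c = true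
    · simp [pvBest, pvALoop1, pvALoop2, pvTier, h1]
    · simp only [Bool.not_eq_true] at h1
      by_cases h2 : pvCond2 c = true
      · simp [pvBest, pvALoop1, pvALoop2, pvTier, h1, h2, pvBest_two]
      · simp only [Bool.not_eq_true] at h2
        by_cases h3 : pvCond3 c = true
        · simp [pvBest, pvALoop1, pvALoop2, pvTier, h1, h2, h3, ih]
        · simp only [Bool.not_eq_true] at h3
          simp [pvBest, pvALoop1, pvALoop2, pvTier, h1, h2, h3, ih]

lemma pvBest_four (cols : List String) : ∀ best,
    pvBest cols best 4 =
      (pvALoop1 cols).getD ((pvALoop2 cols).getD ((pvALoop3 cols).getD best)) := by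
  induction cols with
  | nil => intro best; rfl
  | cons c rest ih =>
    intro best
    by_cases h1 : pvCond1 c = true
    · simp [pvBest, pvALoop1, pvALoop2, pvALoop3, pvTier, h1]
    · simp only [Bool.not_eq_true] at h1
      by_cases h2 : pvCond2 c = true
      · simp [pvBest, pvALoop1, pvALoop2, pvALoop3, pvTier, h1, h2, pvBest_two]
      · simp only [Bool.not_eq_true] at h2
        by_cases h3 : pvCond3 c = true
        · simp [pvBest, pvALoop1, pvALoop2, pvALoop3, pvTier, h1, h2, h3, pvBest_three]
        · simp only [Bool.not_eq_true] at h3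
          simp [pvBest, pvALoop1, pvALoop2, pvALoop3, pvTier, h1, h2, h3, ih]

-- ===== VERDICT (by name: the statement is the Claim_ definition above) =====
theorem detect_col_cpf_cnpj_py_spec : Claim_equal_detect_col_cpf_cnpj_py := by
  intro columns _
  unfold Spec_detect_col_cpf_cnpj_py detect_col_cpf_cnpj_py detect_col_cpf_cnpj_py_alt
  rw [pvBest_four]
  cases pvALoop1 columns <;> cases pvALoop2 columns <;> cases pvALoop3 columns <;> rfl
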